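-- pv_equiv track=rewrite | github.com/lukekasper/Personal-Projects | Python_Practice/arrays.py | max_separation
-- ===== SOURCE A (Python) =====
-- def max_separation(a):
--     max_dist = -1
--     for i in range(len(a)):
--         j = len(a)-1
--         while i < j:
--             if a[i] <= a[j]:
--                 max_dist = max(max_dist, j-i)
--                 break
--             j -= 1
--     return max_dist
-- ===== SOURCE B (Python) =====
-- def max_separation(a):
--     lmin = []
--     for x in a:
--         lmin.append(x if not lmin else min(lmin[-1], x))
--     rmax = []
--     for x in reversed(a):
--         rmax.append(x if not rmax else max(rmax[-1], x))
--     rmax.reverse()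
--     n = len(a)
--     ans = 0
--     i = 0
--     j = 0
--     while j < n:
--         if lmin[i] <= rmax[j]:
--             ans = max(ans, j - i)
--             j += 1
--         else:
--             i += 1
--     return ans if ans > 0 else -1
-- ===== Notes on version B (the rewrite author's own statement) =====
-- stated objective: faster
-- what changed: Replaced A's per-index right-to-left scan (quadratic in the worst case) by the classic linear algorithm: prefix-minima and suffix-maxima arrays swept with two pointers in a single pass.
import Mathlib
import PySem

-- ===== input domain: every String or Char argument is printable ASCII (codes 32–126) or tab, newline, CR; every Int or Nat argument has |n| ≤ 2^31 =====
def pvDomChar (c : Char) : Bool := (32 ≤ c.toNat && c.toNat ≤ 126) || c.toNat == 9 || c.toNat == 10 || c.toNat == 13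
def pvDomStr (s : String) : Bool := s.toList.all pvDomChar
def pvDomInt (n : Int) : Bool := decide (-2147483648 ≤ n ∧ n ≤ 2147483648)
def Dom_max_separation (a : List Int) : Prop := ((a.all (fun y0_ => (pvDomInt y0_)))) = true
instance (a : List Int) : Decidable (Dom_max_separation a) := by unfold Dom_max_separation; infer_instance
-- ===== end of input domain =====

-- B replaces A's per-index right-to-left break-scan (worst-case quadratic) by the linear
-- prefix-min/suffix-max two-pointer sweep; same return value on every input.


-- ===== PORT A =====
-- A's inner 'while i < j: … j -= 1' loop; indices are always in range, so a[i]/a[j] is getD.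
def pvLoopA (a : List Int) (i : Nat) : Nat → Int → Int
  | 0, maxDist => maxDist
  | j + 1, maxDist =>
    if i < j + 1 then
      if a.getD i 0 ≤ a.getD (j + 1) 0 then max maxDist (((j + 1 : Nat) : Int) - (i : Int))
      else pvLoopA a i j maxDist
    else maxDist

def max_separation (a : List Int) : Int :=
  (List.range a.length).foldl (fun maxDist i => pvLoopA a i (a.length - 1) maxDist) (-1)

-- ===== PORT B =====
-- Source B's 'lmin' loop: append running min; the Option is the last appended element (None = empty so far).
def pvScanMin : Option Int → List Int → List Int
  | _, [] => []
  | m?, x :: xs =>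
    let m := match m? with | none => x | some m => min m x
    m :: pvScanMin (some m) xs

-- Source B's 'rmax' loop over reversed(a), same shape with max.
def pvScanMax : Option Int → List Int → List Int
  | _, [] => []
  | m?, x :: xs =>
    let m := match m? with | none => x | some m => max m x
    m :: pvScanMax (some m) xs

-- Source B's 'while j < n' two-pointer loop; fuel 2*n+1 only makes it total (proved sufficient below).
def pvLoopB (lmin rmax : List Int) (n : Nat) : Nat → Nat → Nat → Int → Int
  | 0, _, _, ans => ans
  | fuel + 1, i, j, ans =>
    if j < n then
      if lmin.getD i 0 ≤ rmax.getD j 0 then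
        pvLoopB lmin rmax n fuel i (j + 1) (max ans ((j : Int) - (i : Int)))
      else pvLoopB lmin rmax n fuel (i + 1) j ans
    else ans

def max_separation_alt (a : List Int) : Int :=
  let lmin := pvScanMin none a
  let rmax := (pvScanMax none a.reverse).reverse
  let n := a.length
  let ans := pvLoopB lmin rmax n (2 * n + 1) 0 0 0
  if ans > 0 then ans else -1

-- ===== PRECONDITION & SPEC =====
def Spec_max_separation (a : List Int) (out : Int) : Prop := out = max_separation_alt a
instance (a : List Int) (out : Int) : Decidable (Spec_max_separation a out) := by unfold Spec_max_separation; infer_instance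

-- ===== CLAIM (what is proved, stated in full; the proofs are below) =====
def Claim_equal_max_separation : Prop := ∀ (a : List Int), Dom_max_separation a → Spec_max_separation a (max_separation a)

-- ===== LEMMAS AND PROOFS =====

-- The common characterisation: r is the maximum of j-i over pairs i<j<n with a[i] ≤ a[j], or -1.
def pvGood (a : List Int) (r : Int) : Prop :=
  (∀ i j : Nat, i < j → j < a.length → a.getD i 0 ≤ a.getD j 0 → (j : Int) - (i : Int) ≤ r) ∧
  (r = -1 ∨ ∃ i j : Nat, i < j ∧ j < a.length ∧ a.getD i 0 ≤ a.getD j 0 ∧ r = (j : Int) - (i : Int))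

theorem pvGood_unique {a : List Int} {r s : Int} (hr : pvGood a r) (hs : pvGood a s) : r = s := by
  obtain ⟨hub_r, hm_r⟩ := hr
  obtain ⟨hub_s, hm_s⟩ := hs
  rcases hm_r with hr1 | ⟨i, j, hij, hjn, hle, hre⟩ <;>
    rcases hm_s with hs1 | ⟨i', j', hij', hjn', hle', hse⟩
  · omega
  · have := hub_r i' j' hij' hjn' hle'; omega
  · have := hub_s i j hij hjn hle; omega
  · have h1 := hub_s i j hij hjn hle
    have h2 := hub_r i' j' hij' hjn' hle'
    omega

-- ---- A side ----

theorem pvLoopA_spec (a : List Int) (i : Nat) :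
    ∀ (j : Nat) (md : Int),
      md ≤ pvLoopA a i j md ∧
      (∀ j0 : Nat, i < j0 → j0 ≤ j → a.getD i 0 ≤ a.getD j0 0 →
          (j0 : Int) - (i : Int) ≤ pvLoopA a i j md) ∧
      (pvLoopA a i j md = md ∨ ∃ j0 : Nat, i < j0 ∧ j0 ≤ j ∧ a.getD i 0 ≤ a.getD j0 0 ∧
          pvLoopA a i j md = (j0 : Int) - (i : Int)) := by
  intro j
  induction j with
  | zero =>
    intro md
    simp only [pvLoopA]
    refine ⟨le_refl _, ?_, Or.inl trivial⟩
    intro j0 h1 h2 _; omega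
  | succ j ih =>
    intro md
    by_cases hij : i < j + 1
    · by_cases hc : a.getD i 0 ≤ a.getD (j + 1) 0
      · simp only [pvLoopA, if_pos hij, if_pos hc]
        refine ⟨le_max_left _ _, ?_, ?_⟩
        · intro j0 h1 h2 _
          have h3 : ((j0 : Int)) ≤ ((j + 1 : Nat) : Int) := by exact_mod_cast h2
          have h4 := le_max_right md (((j + 1 : Nat) : Int) - (i : Int))
          omega
        · rcases max_choice md (((j + 1 : Nat) : Int) - (i : Int)) with h | h
          · exact Or.inl h
          · exact Or.inr ⟨j + 1, hij, le_refl _, hc, h⟩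
      · simp only [pvLoopA, if_pos hij, if_neg hc]
        obtain ⟨h1, h2, h3⟩ := ih md
        refine ⟨h1, ?_, ?_⟩
        · intro j0 hi0 hj0 hle
          rcases Nat.lt_or_ge j0 (j + 1) with h | h
          · exact h2 j0 hi0 (by omega) hle
          · have : j0 = j + 1 := by omega
            subst this; exact absurd hle hc
        · rcases h3 with h | ⟨j0, ha, hb, hcc, hd⟩
          · exact Or.inl h
          · exact Or.inr ⟨j0, ha, by omega, hcc, hd⟩
    · simp only [pvLoopA, if_neg hij]
      refine ⟨le_refl _, ?_, Or.inl trivial⟩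
      intro j0 h1 h2 _; omega

theorem pvFoldA_good (a : List Int) :
    ∀ m : Nat,
      (∀ i j : Nat, i < m → i < j → j < a.length → a.getD i 0 ≤ a.getD j 0 →
          (j : Int) - (i : Int) ≤ (List.range m).foldl (fun md i => pvLoopA a i (a.length - 1) md) (-1)) ∧
      ((List.range m).foldl (fun md i => pvLoopA a i (a.length - 1) md) (-1) = -1 ∨
        ∃ i j : Nat, i < j ∧ j < a.length ∧ a.getD i 0 ≤ a.getD j 0 ∧
          (List.range m).foldl (fun md i => pvLoopA a i (a.length - 1) md) (-1) = (j : Int) - (i : Int)) := by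
  intro m
  induction m with
  | zero =>
    simp only [List.range_zero, List.foldl_nil]
    exact ⟨by intro i j h; omega, Or.inl trivial⟩
  | succ m ih =>
    rw [List.range_succ, List.foldl_append, List.foldl_cons, List.foldl_nil]
    set md := (List.range m).foldl (fun md i => pvLoopA a i (a.length - 1) md) (-1) with hmd
    obtain ⟨hub, hmem⟩ := ih
    obtain ⟨hge, hub', hmem'⟩ := pvLoopA_spec a m (a.length - 1) md
    constructor
    · intro i j hi hij hjn hle
      rcases Nat.lt_or_ge i m with h | h
      · have := hub i j h hij hjn hle; omega
      · have : i = m := by omega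
        subst this
        exact hub' j hij (by omega) hle
    · rcases hmem' with h | ⟨j0, h1, h2, h3, h4⟩
      · rw [h]
        rcases hmem with h' | ⟨i, j, h1, h2, h3, h4⟩
        · exact Or.inl h'
        · exact Or.inr ⟨i, j, h1, h2, h3, h4⟩
      · exact Or.inr ⟨m, j0, h1, by omega, h3, h4⟩

theorem pvA_good (a : List Int) : pvGood a (max_separation a) := by
  obtain ⟨hub, hmem⟩ := pvFoldA_good a a.length
  exact ⟨fun i j hij hjn hle => hub i j (by omega) hij hjn hle, hmem⟩

-- ---- B side: scan lemmas ----

theorem pvScanMax_length : ∀ (m? : Option Int) (l : List Int), (pvScanMax m? l).length = l.length := by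
  intro m? l
  induction l generalizing m? with
  | nil => rfl
  | cons x xs ih => simp [pvScanMax, ih]

theorem pvScanMin_some_le (l : List Int) :
    ∀ (m : Int) (i i' : Nat), i' ≤ i → i < l.length →
      (pvScanMin (some m) l).getD i 0 ≤ l.getD i' 0 ∧ (pvScanMin (some m) l).getD i 0 ≤ m := by
  induction l with
  | nil => intro m i i' _ h; simp at h
  | cons x xs ih =>
    intro m i i' hii hi
    simp only [pvScanMin]
    cases i with
    | zero =>
      have : i' = 0 := by omega
      subst this
      simp
    | succ k =>
      have hk : k < xs.length := by simpa using hi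
      cases i' with
      | zero =>
        obtain ⟨_, h2⟩ := ih (min m x) k 0 (by omega) hk
        constructor
        · simp only [List.getD_cons_succ, List.getD_cons_zero]
          exact le_trans h2 (min_le_right _ _)
        · simp only [List.getD_cons_succ]
          exact le_trans h2 (min_le_left _ _)
      | succ k' =>
        obtain ⟨h1, h2⟩ := ih (min m x) k k' (by omega) hk
        exact ⟨by simpa using h1, by simpa using le_trans h2 (min_le_left _ _)⟩

theorem pvScanMax_some_ge (l : List Int) :
    ∀ (m : Int) (i i' : Nat), i' ≤ i → i < l.length →
      l.getD i' 0 ≤ (pvScanMax (some m) l).getD i 0 ∧ m ≤ (pvScanMax (some m) l).getD i 0 := by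
  induction l with
  | nil => intro m i i' _ h; simp at h
  | cons x xs ih =>
    intro m i i' hii hi
    simp only [pvScanMax]
    cases i with
    | zero =>
      have : i' = 0 := by omega
      subst this
      simp
    | succ k =>
      have hk : k < xs.length := by simpa using hi
      cases i' with
      | zero =>
        obtain ⟨_, h2⟩ := ih (max m x) k 0 (by omega) hk
        constructor
        · simp only [List.getD_cons_succ, List.getD_cons_zero]
          exact le_trans (le_max_right m x) h2
        · simp only [List.getD_cons_succ]
          exact le_trans (le_max_left m x) h2
      | succ k' =>
        obtain ⟨h1, h2⟩ := ih (max m x) k k' (by omega) hk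
        exact ⟨by simpa using h1, by simpa using le_trans (le_max_left m x) h2⟩

theorem pvScanMin_some_mem (l : List Int) :
    ∀ (m : Int) (i : Nat), i < l.length →
      (pvScanMin (some m) l).getD i 0 = m ∨
      ∃ i' : Nat, i' ≤ i ∧ (pvScanMin (some m) l).getD i 0 = l.getD i' 0 := by
  induction l with
  | nil => intro m i h; simp at h
  | cons x xs ih =>
    intro m i hi
    simp only [pvScanMin]
    cases i with
    | zero =>
      rcases min_choice m x with h | h
      · exact Or.inl (by simpa using h)
      · exact Or.inr ⟨0, le_refl _, by simpa using h⟩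
    | succ k =>
      have hk : k < xs.length := by simpa using hi
      rcases ih (min m x) k hk with h | ⟨i', hi', h⟩
      · rcases min_choice m x with h' | h'
        · exact Or.inl (by simp only [List.getD_cons_succ]; rw [h, h'])
        · exact Or.inr ⟨0, by omega, by simp only [List.getD_cons_succ, List.getD_cons_zero]; rw [h, h']⟩
      · exact Or.inr ⟨i' + 1, by omega, by simpa using h⟩

theorem pvScanMax_some_mem (l : List Int) :
    ∀ (m : Int) (i : Nat), i < l.length →
      (pvScanMax (some m) l).getD i 0 = m ∨
      ∃ i' : Nat, i' ≤ i ∧ (pvScanMax (some m) l).getD i 0 = l.getD i' 0 := by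
  induction l with
  | nil => intro m i h; simp at h
  | cons x xs ih =>
    intro m i hi
    simp only [pvScanMax]
    cases i with
    | zero =>
      rcases max_choice m x with h | h
      · exact Or.inl (by simpa using h)
      · exact Or.inr ⟨0, le_refl _, by simpa using h⟩
    | succ k =>
      have hk : k < xs.length := by simpa using hi
      rcases ih (max m x) k hk with h | ⟨i', hi', h⟩
      · rcases max_choice m x with h' | h'
        · exact Or.inl (by simp only [List.getD_cons_succ]; rw [h, h'])
        · exact Or.inr ⟨0, by omega, by simp only [List.getD_cons_succ, List.getD_cons_zero]; rw [h, h']⟩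
      · exact Or.inr ⟨i' + 1, by omega, by simpa using h⟩

-- lmin[i] ≤ l[i'] for i' ≤ i
theorem pvLmin_le (l : List Int) (i i' : Nat) (hii : i' ≤ i) (hi : i < l.length) :
    (pvScanMin none l).getD i 0 ≤ l.getD i' 0 := by
  cases l with
  | nil => simp at hi
  | cons x xs =>
    simp only [pvScanMin]
    cases i with
    | zero =>
      have : i' = 0 := by omega
      subst this; simp
    | succ k =>
      have hk : k < xs.length := by simpa using hi
      cases i' with
      | zero =>
        have h2 := (pvScanMin_some_le xs x k 0 (by omega) hk).2
        simpa using h2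
      | succ k' =>
        have h1 := (pvScanMin_some_le xs x k k' (by omega) hk).1
        simpa using h1

theorem pvLmin_mem (l : List Int) (i : Nat) (hi : i < l.length) :
    ∃ i' : Nat, i' ≤ i ∧ (pvScanMin none l).getD i 0 = l.getD i' 0 := by
  cases l with
  | nil => simp at hi
  | cons x xs =>
    simp only [pvScanMin]
    cases i with
    | zero => exact ⟨0, le_refl _, by simp⟩
    | succ k =>
      have hk : k < xs.length := by simpa using hi
      rcases pvScanMin_some_mem xs x k hk with h | ⟨i', hi', h⟩
      · exact ⟨0, by omega, by simpa using h⟩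
      · exact ⟨i' + 1, by omega, by simpa using h⟩

theorem pvSmax_ge (l : List Int) (i i' : Nat) (hii : i' ≤ i) (hi : i < l.length) :
    l.getD i' 0 ≤ (pvScanMax none l).getD i 0 := by
  cases l with
  | nil => simp at hi
  | cons x xs =>
    simp only [pvScanMax]
    cases i with
    | zero =>
      have : i' = 0 := by omega
      subst this; simp
    | succ k =>
      have hk : k < xs.length := by simpa using hi
      cases i' with
      | zero =>
        have h2 := (pvScanMax_some_ge xs x k 0 (by omega) hk).2
        simpa using h2
      | succ k' =>
        have h1 := (pvScanMax_some_ge xs x k k' (by omega) hk).1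
        simpa using h1

theorem pvSmax_mem (l : List Int) (i : Nat) (hi : i < l.length) :
    ∃ i' : Nat, i' ≤ i ∧ (pvScanMax none l).getD i 0 = l.getD i' 0 := by
  cases l with
  | nil => simp at hi
  | cons x xs =>
    simp only [pvScanMax]
    cases i with
    | zero => exact ⟨0, le_refl _, by simp⟩
    | succ k =>
      have hk : k < xs.length := by simpa using hi
      rcases pvScanMax_some_mem xs x k hk with h | ⟨i', hi', h⟩
      · exact ⟨0, by omega, by simpa using h⟩
      · exact ⟨i' + 1, by omega, by simpa using h⟩

-- ---- B side: the rmax list (reverse juggling) ----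

theorem pvRmax_getD (a : List Int) (j : Nat) (hj : j < a.length) :
    ((pvScanMax none a.reverse).reverse).getD j 0
      = (pvScanMax none a.reverse).getD (a.length - 1 - j) 0 := by
  have hlen : (pvScanMax none a.reverse).length = a.length := by
    rw [pvScanMax_length, List.length_reverse]
  have hj' : j < (pvScanMax none a.reverse).reverse.length := by
    rw [List.length_reverse, hlen]; exact hj
  have h2 : a.length - 1 - j < (pvScanMax none a.reverse).length := by omega
  rw [List.getD_eq_getElem _ _ hj', List.getElem_reverse, List.getD_eq_getElem _ _ h2]
  exact getElem_congr rfl (by omega : (pvScanMax none a.reverse).length - 1 - j = a.length - 1 - j)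
    (by omega : (pvScanMax none a.reverse).length - 1 - j < (pvScanMax none a.reverse).length)

theorem pvRev_getD (a : List Int) (k : Nat) (hk : k < a.length) :
    a.reverse.getD k 0 = a.getD (a.length - 1 - k) 0 := by
  have hk' : k < a.reverse.length := by rw [List.length_reverse]; exact hk
  rw [List.getD_eq_getElem _ _ hk', List.getElem_reverse,
      List.getD_eq_getElem _ _ (by omega : a.length - 1 - k < a.length)]

theorem pvRmax_ge (a : List Int) (j j' : Nat) (hjj : j ≤ j') (hj' : j' < a.length) :
    a.getD j' 0 ≤ ((pvScanMax none a.reverse).reverse).getD j 0 := by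
  have hj : j < a.length := by omega
  rw [pvRmax_getD a j hj]
  have h1 : a.getD j' 0 = a.reverse.getD (a.length - 1 - j') 0 := by
    rw [pvRev_getD a (a.length - 1 - j') (by omega)]
    congr 1; omega
  rw [h1]
  exact pvSmax_ge a.reverse (a.length - 1 - j) (a.length - 1 - j') (by omega)
    (by rw [List.length_reverse]; omega)

theorem pvRmax_mem (a : List Int) (j : Nat) (hj : j < a.length) :
    ∃ j' : Nat, j ≤ j' ∧ j' < a.length ∧
      ((pvScanMax none a.reverse).reverse).getD j 0 = a.getD j' 0 := by
  rw [pvRmax_getD a j hj]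
  obtain ⟨i', hi', h⟩ := pvSmax_mem a.reverse (a.length - 1 - j) (by rw [List.length_reverse]; omega)
  refine ⟨a.length - 1 - i', by omega, by omega, ?_⟩
  rw [h, pvRev_getD a i' (by omega : i' < a.length)]

theorem pvRmax_anti (a : List Int) (j j' : Nat) (hjj : j ≤ j') (hj' : j' < a.length) :
    ((pvScanMax none a.reverse).reverse).getD j' 0 ≤ ((pvScanMax none a.reverse).reverse).getD j 0 := by
  obtain ⟨k, hk1, hk2, hk3⟩ := pvRmax_mem a j' hj'
  rw [hk3]
  exact pvRmax_ge a j k (by omega) hk2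

-- ---- B side: two-pointer loop invariant ----

theorem pvLoopB_good (lmin rmax : List Int) (n : Nat)
    (hH : ∀ k : Nat, k < n → lmin.getD k 0 ≤ rmax.getD k 0)
    (hA : ∀ p q : Nat, p ≤ q → q < n → rmax.getD q 0 ≤ rmax.getD p 0) :
    ∀ (fuel i j : Nat) (ans : Int),
      (n - i) + (n - j) < fuel → i ≤ j → j ≤ n →
      (∀ i0 j0 : Nat, i0 < i → i0 ≤ j0 → j0 < n → lmin.getD i0 0 ≤ rmax.getD j0 0 →
          (j0 : Int) - (i0 : Int) ≤ ans) →
      (∀ i0 j0 : Nat, j0 < j → i0 ≤ j0 → lmin.getD i0 0 ≤ rmax.getD j0 0 →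
          (j0 : Int) - (i0 : Int) ≤ ans) →
      (ans = 0 ∨ ∃ i0 j0 : Nat, i0 ≤ j0 ∧ j0 < n ∧ lmin.getD i0 0 ≤ rmax.getD j0 0 ∧
          ans = (j0 : Int) - (i0 : Int)) →
      ((∀ i0 j0 : Nat, i0 ≤ j0 → j0 < n → lmin.getD i0 0 ≤ rmax.getD j0 0 →
          (j0 : Int) - (i0 : Int) ≤ pvLoopB lmin rmax n fuel i j ans) ∧
       (pvLoopB lmin rmax n fuel i j ans = 0 ∨
        ∃ i0 j0 : Nat, i0 ≤ j0 ∧ j0 < n ∧ lmin.getD i0 0 ≤ rmax.getD j0 0 ∧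
          pvLoopB lmin rmax n fuel i j ans = (j0 : Int) - (i0 : Int))) := by
  intro fuel
  induction fuel with
  | zero => intro i j ans hfuel; omega
  | succ fuel ih =>
    intro i j ans hfuel hij hjn hI2 hI3 hmem
    by_cases hj : j < n
    · by_cases hc : lmin.getD i 0 ≤ rmax.getD j 0
      · simp only [pvLoopB, if_pos hj, if_pos hc]
        apply ih i (j + 1) (max ans ((j : Int) - (i : Int))) (by omega) (by omega) (by omega)
        · intro i0 j0 h1 h2 h3 h4
          have := hI2 i0 j0 h1 h2 h3 h4
          have := le_max_left ans ((j : Int) - (i : Int))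
          omega
        · intro i0 j0 h1 h2 h3
          rcases Nat.lt_or_ge j0 j with h | h
          · have := hI3 i0 j0 h h2 h3
            have := le_max_left ans ((j : Int) - (i : Int))
            omega
          · have hj0 : j0 = j := by omega
            subst hj0
            rcases Nat.lt_or_ge i0 i with h' | h'
            · have := hI2 i0 j0 h' h2 hj h3
              have := le_max_left ans ((j0 : Int) - (i : Int))
              omega
            · have := le_max_right ans ((j0 : Int) - (i : Int))
              omega
        · rcases le_total ans ((j : Int) - (i : Int)) with h | h
          · rw [max_eq_right h]
            exact Or.inr ⟨i, j, hij, hj, hc, rfl⟩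
          · rw [max_eq_left h]
            exact hmem
      · simp only [pvLoopB, if_pos hj, if_neg hc]
        have hilt : i < j := by
          rcases Nat.lt_or_ge i j with h | h
          · exact h
          · have : i = j := by omega
            subst this
            exact absurd (hH i hj) hc
        apply ih (i + 1) j ans (by omega) (by omega) (by omega)
        · intro i0 j0 h1 h2 h3 h4
          rcases Nat.lt_or_ge i0 i with h' | h'
          · exact hI2 i0 j0 h' h2 h3 h4
          · have hi0 : i0 = i := by omega
            subst hi0
            rcases Nat.lt_or_ge j0 j with h'' | h''
            · exact hI3 i0 j0 h'' h2 h4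
            · exact absurd (le_trans h4 (hA j j0 h'' h3)) hc
        · exact hI3
        · exact hmem
    · simp only [pvLoopB, if_neg hj]
      refine ⟨?_, hmem⟩
      intro i0 j0 h1 h2 h3
      exact hI3 i0 j0 (by omega) h1 h3

theorem pvB_good (a : List Int) : pvGood a (max_separation_alt a) := by
  set lmin := pvScanMin none a with hlmin
  set rmax := (pvScanMax none a.reverse).reverse with hrmax
  set n := a.length with hn
  have hH : ∀ k : Nat, k < n → lmin.getD k 0 ≤ rmax.getD k 0 := by
    intro k hk
    exact le_trans (pvLmin_le a k k (le_refl _) hk) (pvRmax_ge a k k (le_refl _) hk)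
  have hA : ∀ p q : Nat, p ≤ q → q < n → rmax.getD q 0 ≤ rmax.getD p 0 := by
    intro p q h1 h2
    exact pvRmax_anti a p q h1 h2
  obtain ⟨hub, hmem⟩ := pvLoopB_good lmin rmax n hH hA (2 * n + 1) 0 0 0
    (by omega) (le_refl _) (by omega)
    (by intro i0 j0 h; omega)
    (by intro i0 j0 h; omega)
    (Or.inl rfl)
  set r := pvLoopB lmin rmax n (2 * n + 1) 0 0 0 with hr
  have hr0 : 0 ≤ r := by
    rcases hmem with h | ⟨i0, j0, h1, h2, h3, h4⟩
    · omega
    · have : (i0 : Int) ≤ (j0 : Int) := by exact_mod_cast h1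
      omega
  have halt : max_separation_alt a = if r > 0 then r else -1 := by
    simp only [max_separation_alt]
    rfl
  -- a-pairs are lmin/rmax pairs
  have hconv : ∀ i j : Nat, i < j → j < n → a.getD i 0 ≤ a.getD j 0 →
      lmin.getD i 0 ≤ rmax.getD j 0 := by
    intro i j hij hjn hle
    exact le_trans (pvLmin_le a i i (le_refl _) (by omega)) (le_trans hle (pvRmax_ge a j j (le_refl _) hjn))
  rw [halt]
  by_cases hpos : r > 0
  · rw [if_pos hpos]
    constructor
    · intro i j hij hjn hle
      exact hub i j (by omega) hjn (hconv i j hij hjn hle)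
    · rcases hmem with h | ⟨i0, j0, h1, h2, h3, h4⟩
      · omega
      · -- convert the lmin/rmax pair into an actual pair of a with the same distance
        obtain ⟨i', hi'1, hi'2⟩ := pvLmin_mem a i0 (by omega)
        obtain ⟨j', hj'1, hj'2, hj'3⟩ := pvRmax_mem a j0 h2
        have hle' : a.getD i' 0 ≤ a.getD j' 0 := by
          rw [← hi'2, ← hj'3]; exact h3
        have hij' : i' < j' := by
          have : (i0 : Int) < (j0 : Int) := by omega
          omega
        have hub' := hub i' j' (by omega) hj'2 (hconv i' j' hij' hj'2 hle')
        refine Or.inr ⟨i', j', hij', hj'2, hle', ?_⟩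
        have : (i' : Int) ≤ (i0 : Int) := by exact_mod_cast hi'1
        have : (j0 : Int) ≤ (j' : Int) := by exact_mod_cast hj'1
        omega
  · rw [if_neg hpos]
    constructor
    · intro i j hij hjn hle
      have := hub i j (by omega) hjn (hconv i j hij hjn hle)
      omega
    · exact Or.inl rfl

-- ===== VERDICT (by name: the statement is the Claim_ definition above) =====
theorem max_separation_spec : Claim_equal_max_separation := by
  intro a _
  unfold Spec_max_separation
  exact pvGood_unique (pvA_good a) (pvB_good a)
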